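-- pv_equiv track=rewrite | github.com/hhoangphuoc/SpeechLaughRecogniser | preprocess/transcript_process.py | transform_number_words
-- ===== SOURCE A (Python) =====
-- def transform_number_words(text, reverse=False):
--     """
--     Transform number words between spelled out form and digit pairs.
--     If reverse=False (default): Convert number words to digit pairs
--     If reverse=True: Convert digit pairs back to number words
--
--     Examples with reverse=False:
--     - nineteen -> one nine
--     - twenty -> two zero
--
--     Examples with reverse=True:
--     - one nine -> nineteen
--     - two zero -> twenty
--     """
--
--     # Dictionary for number word mappings
--     number_mappings = {
--         'eleven': 'one one',
--         'twelve': 'one two',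
--         'thirteen': 'one three',
--         'fourteen': 'one four',
--         'fifteen': 'one five',
--         'sixteen': 'one six',
--         'seventeen': 'one seven',
--         'twenty': 'two zero',
--         'thirty': 'three zero',
--         'forty': 'four zero',
--         'fifty': 'five zero',
--         'sixty': 'six zero',
--         'seventy': 'seven zero',
--         'eighty': 'eight zero',
--         'ninety': 'nine zero'
--     }
--
--     # Create reverse mapping for converting back
--     reverse_mappings = {v: k for k, v in number_mappings.items()}
--
--     words = text.split()
--     transformed_words = []
--
--     if not reverse:
--         # Forward transformation (number words to digit pairs)
--         for word in words:
--             if word in number_mappings: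
--                 transformed_words.append(number_mappings[word])
--             else:
--                 transformed_words.append(word)
--     else:
--         # Reverse transformation (digit pairs to number words)
--         i = 0
--         while i < len(words):
--             if i < len(words) - 1:
--                 word_pair = words[i] + ' ' + words[i+1]
--                 if word_pair in reverse_mappings:
--                     transformed_words.append(reverse_mappings[word_pair])
--                     i += 2
--                     continue
--             transformed_words.append(words[i])
--             i += 1
--
--     return ' '.join(transformed_words)
-- ===== SOURCE B (Python) =====
-- def transform_number_words(text, reverse=False):
--     """Same transformation as A: tables generated from unit/teen/ten word lists,
--     forward pass as a comprehension, reverse pass as structural recursion on the word list."""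
--     units = ['one', 'two', 'three', 'four', 'five', 'six', 'seven', 'eight', 'nine']
--     teens = ['eleven', 'twelve', 'thirteen', 'fourteen', 'fifteen', 'sixteen', 'seventeen']
--     tens = ['twenty', 'thirty', 'forty', 'fifty', 'sixty', 'seventy', 'eighty', 'ninety']
--     pairs = [('one ' + u, t) for u, t in zip(units, teens)] + \
--             [(u + ' zero', t) for u, t in zip(units[1:], tens)]
--     words = text.split()
--     if not reverse:
--         table = {w: p for p, w in pairs}
--         return ' '.join(table.get(w, w) for w in words)
--     table = dict(pairs)
--
--     def go(ws):
--         if not ws: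
--             return []
--         if len(ws) >= 2:
--             key = ws[0] + ' ' + ws[1]
--             if key in table:
--                 return [table[key]] + go(ws[2:])
--         return [ws[0]] + go(ws[1:])
--
--     return ' '.join(go(words))
-- ===== Notes on version B (the rewrite author's own statement) =====
-- stated objective: alternative
-- what changed: Tables are generated from unit/teen/ten word lists (zip comprehensions) instead of two hand-written dict literals, the forward pass becomes a single join-over-map comprehension instead of a loop with appends, and the reverse greedy pairing becomes structural recursion on the word list instead of an index-based while loop.
import Mathlib
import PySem

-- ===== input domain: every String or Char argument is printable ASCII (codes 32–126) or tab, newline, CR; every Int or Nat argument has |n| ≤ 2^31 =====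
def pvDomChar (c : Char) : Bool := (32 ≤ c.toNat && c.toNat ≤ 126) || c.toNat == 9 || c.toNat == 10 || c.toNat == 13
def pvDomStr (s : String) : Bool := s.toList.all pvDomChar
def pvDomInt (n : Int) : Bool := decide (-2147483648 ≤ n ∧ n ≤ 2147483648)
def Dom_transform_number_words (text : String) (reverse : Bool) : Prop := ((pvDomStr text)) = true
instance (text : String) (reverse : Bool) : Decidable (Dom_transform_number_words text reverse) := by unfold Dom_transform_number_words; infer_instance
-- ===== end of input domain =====

-- B differs from A by generating the tables from word lists, a join-over-map forward pass,
-- and structural recursion (instead of an index while-loop) for the reverse pairing: alternative decomposition, same cost.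

-- ===== PORT A =====
-- the literal dict 'number_mappings'
def nmA : PySem.Dict String String := PySem.Dict.ofList
  [("eleven", "one one"), ("twelve", "one two"), ("thirteen", "one three"),
   ("fourteen", "one four"), ("fifteen", "one five"), ("sixteen", "one six"),
   ("seventeen", "one seven"), ("twenty", "two zero"), ("thirty", "three zero"),
   ("forty", "four zero"), ("fifty", "five zero"), ("sixty", "six zero"),
   ("seventy", "seven zero"), ("eighty", "eight zero"), ("ninety", "nine zero")]

-- reverse_mappings = {v: k for k, v in number_mappings.items()}
def rmA : PySem.Dict String String :=
  nmA.items.foldl (fun d kv => d.insert kv.2 kv.1) PySem.Dict.empty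

-- the 'while i < len(words)' loop of the reverse branch (i is always ≥ 0 in Python, so Nat;
-- 'i < len(words) - 1' coincides with the Python Int comparison for every i ≥ 0)
def revLoopA (words : List String) (i : Nat) (acc : List String) : List String :=
  if i < words.length then
    if i < words.length - 1 then
      let word_pair := (words.getD i "") ++ " " ++ (words.getD (i + 1) "")
      match rmA.get? word_pair with
      | some v => revLoopA words (i + 2) (acc ++ [v])
      | none => revLoopA words (i + 1) (acc ++ [words.getD i ""])
    else revLoopA words (i + 1) (acc ++ [words.getD i ""])
  else acc
termination_by words.length - i
decreasing_by all_goals omega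

def transform_number_words (text : String) (reverse : Bool) : String :=
  let words := PySem.Str.split₀ text
  if !reverse then
    PySem.Str.join " " (words.foldl
      (fun acc word => if nmA.contains word then acc ++ [nmA.getD word ""] else acc ++ [word]) [])
  else
    PySem.Str.join " " (revLoopA words 0 [])

-- ===== PORT B =====
def unitsB : List String := ["one", "two", "three", "four", "five", "six", "seven", "eight", "nine"]
def teensB : List String := ["eleven", "twelve", "thirteen", "fourteen", "fifteen", "sixteen", "seventeen"]
def tensB : List String := ["twenty", "thirty", "forty", "fifty", "sixty", "seventy", "eighty", "ninety"]

def pairsB : List (String × String) :=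
  (unitsB.zip teensB).map (fun ut => ("one " ++ ut.1, ut.2)) ++
  ((unitsB.drop 1).zip tensB).map (fun ut => (ut.1 ++ " zero", ut.2))

-- table = {w: p for p, w in pairs}   (forward branch)
def fwdTableB : PySem.Dict String String := PySem.Dict.ofList (pairsB.map (fun pw => (pw.2, pw.1)))

-- table = dict(pairs)   (reverse branch)
def revTableB : PySem.Dict String String := PySem.Dict.ofList pairsB

-- def go(ws): structural recursion on the word list
def goB : List String → List String
  | [] => []
  | w :: rest =>
    match rest with
    | w2 :: rest2 =>
      (match revTableB.get? (w ++ " " ++ w2) with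
       | some v => v :: goB rest2
       | none => w :: goB (w2 :: rest2))
    | [] => [w]

def transform_number_words_alt (text : String) (reverse : Bool) : String :=
  let words := PySem.Str.split₀ text
  if !reverse then
    PySem.Str.join " " (words.map (fun w => fwdTableB.getD w w))
  else
    PySem.Str.join " " (goB words)

-- ===== PRECONDITION & SPEC =====
def Spec_transform_number_words (text : String) (reverse : Bool) (out : String) : Prop := out = transform_number_words_alt text reverse
instance (text : String) (reverse : Bool) (out : String) : Decidable (Spec_transform_number_words text reverse out) := by unfold Spec_transform_number_words; infer_instance

-- ===== CLAIM (what is proved, stated in full; the proofs are below) =====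
def Claim_equal_transform_number_words : Prop := ∀ (text : String) (reverse : Bool), Dom_transform_number_words text reverse → Spec_transform_number_words text reverse (transform_number_words text reverse)

-- ===== LEMMAS AND PROOFS =====
-- A's forward dict equals B's forward table (both literal closed terms)
theorem nmA_eq_fwdTableB : nmA = fwdTableB := by decide

-- A's comprehension-built reverse dict equals B's dict(pairs)
theorem rmA_eq_revTableB : rmA = revTableB := by decide

theorem contains_getD_eq (d : PySem.Dict String String) (w : String) :
    (if d.contains w then d.getD w "" else w) = d.getD w w := by
  rw [PySem.Dict.contains_eq_isSome_get?, PySem.Dict.getD_eq_get?_getD, PySem.Dict.getD_eq_get?_getD]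
  cases d.get? w <;> simp

theorem forward_fold_eq_map (ws : List String) :
    ws.foldl (fun acc word => if nmA.contains word then acc ++ [nmA.getD word ""] else acc ++ [word]) []
      = ws.map (fun w => fwdTableB.getD w w) := by
  have hfun : (fun (acc : List String) word =>
      if nmA.contains word then acc ++ [nmA.getD word ""] else acc ++ [word])
      = fun acc word => acc ++ [if nmA.contains word then nmA.getD word "" else word] := by
    funext acc word; split <;> rfl
  rw [hfun, PySem.List.foldl_append_singleton_eq_map]
  exact List.map_congr_left (fun w _ => by rw [contains_getD_eq, nmA_eq_fwdTableB])

theorem revLoopA_eq_goB (ws : List String) (i : Nat) (acc : List String) :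
    revLoopA ws i acc = acc ++ goB (ws.drop i) := by
  generalize hn : ws.length - i = n
  induction n using Nat.strong_induction_on generalizing i acc with
  | _ n ih =>
  by_cases hi : i < ws.length
  case neg =>
    rw [revLoopA, if_neg hi, List.drop_eq_nil_of_le (by omega)]
    simp [goB]
  case pos =>
    rw [revLoopA, if_pos hi]
    have hdrop : ws.drop i = ws[i] :: ws.drop (i + 1) := List.drop_eq_getElem_cons hi
    have hget : ws.getD i "" = ws[i] := by simp [List.getD_eq_getElem?_getD, hi]
    by_cases h1 : i < ws.length - 1
    · have hi1 : i + 1 < ws.length := by omega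
      have hdrop1 : ws.drop (i + 1) = ws[i+1] :: ws.drop (i + 2) :=
        List.drop_eq_getElem_cons hi1
      have hget1 : ws.getD (i + 1) "" = ws[i+1] := by
        simp [List.getD_eq_getElem?_getD, hi1]
      rw [if_pos h1, hdrop, hdrop1, goB]
      simp only [hget, hget1, rmA_eq_revTableB]
      cases h : revTableB.get? (ws[i] ++ " " ++ ws[i+1]) with
      | some v =>
        change revLoopA ws (i + 2) (acc ++ [v]) = acc ++ (v :: goB (ws.drop (i + 2)))
        rw [ih (ws.length - (i + 2)) (by omega) (i + 2) (acc ++ [v]) rfl]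
        simp
      | none =>
        change revLoopA ws (i + 1) (acc ++ [ws[i]]) = acc ++ (ws[i] :: goB (ws[i+1] :: ws.drop (i + 2)))
        rw [ih (ws.length - (i + 1)) (by omega) (i + 1) (acc ++ [ws[i]]) rfl, hdrop1]
        simp
    · have hdropnil : ws.drop (i + 1) = [] := List.drop_eq_nil_of_le (by omega)
      rw [if_neg h1, hget,
        ih (ws.length - (i + 1)) (by omega) (i + 1) (acc ++ [ws[i]]) rfl, hdrop, hdropnil, goB]
      simp [goB]

-- ===== VERDICT (by name: the statement is the Claim_ definition above) =====
theorem transform_number_words_spec : Claim_equal_transform_number_words := by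
  intro text reverse _
  unfold Spec_transform_number_words transform_number_words transform_number_words_alt
  cases reverse with
  | false => simp [forward_fold_eq_map]
  | true => simp [revLoopA_eq_goB (PySem.Str.split₀ text) 0 []]
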